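-- pv_equiv track=rewrite | github.com/BaseFerRhin/BaseFerRhin | data/analysis/ea_fr/ingest.py | map_vestiges_to_type
-- ===== SOURCE A (Python) =====
-- def map_vestiges_to_type(vestiges_list: list[str], vmap: dict[str, str]) -> str:
--     """Priorité : nécropole > atelier > habitat (reste)."""
--     codes: set[str] = set()
--     for v in vestiges_list:
--         key = (v or "").strip().lower()
--         if key in vmap:
--             codes.add(vmap[key])
--     if "NECROPOLE" in codes:
--         return "NECROPOLE"
--     if "ATELIER" in codes:
--         return "ATELIER"
--     if codes:
--         return sorted(codes)[0]
--     return "INDETERMINE"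
-- ===== SOURCE B (Python) =====
-- def map_vestiges_to_type(vestiges_list: list[str], vmap: dict[str, str]) -> str:
--     """Priorite : necropole > atelier > habitat (reste)."""
--     has_nec = False
--     has_at = False
--     best_other = None
--     for v in vestiges_list:
--         code = vmap.get((v or "").strip().lower())
--         if code is None:
--             continue
--         if code == "NECROPOLE":
--             has_nec = True
--         elif code == "ATELIER":
--             has_at = True
--         elif best_other is None or code < best_other:
--             best_other = code
--     if has_nec:
--         return "NECROPOLE"
--     if has_at:
--         return "ATELIER"
--     if best_other is not None:
--         return best_other
--     return "INDETERMINE"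
-- ===== Notes on version B (the rewrite author's own statement) =====
-- stated objective: simpler
-- what changed: Replaced the set accumulation plus sorted() post-pass by one streaming pass keeping two boolean flags and a running lexicographic minimum of the other codes.
import Mathlib
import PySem

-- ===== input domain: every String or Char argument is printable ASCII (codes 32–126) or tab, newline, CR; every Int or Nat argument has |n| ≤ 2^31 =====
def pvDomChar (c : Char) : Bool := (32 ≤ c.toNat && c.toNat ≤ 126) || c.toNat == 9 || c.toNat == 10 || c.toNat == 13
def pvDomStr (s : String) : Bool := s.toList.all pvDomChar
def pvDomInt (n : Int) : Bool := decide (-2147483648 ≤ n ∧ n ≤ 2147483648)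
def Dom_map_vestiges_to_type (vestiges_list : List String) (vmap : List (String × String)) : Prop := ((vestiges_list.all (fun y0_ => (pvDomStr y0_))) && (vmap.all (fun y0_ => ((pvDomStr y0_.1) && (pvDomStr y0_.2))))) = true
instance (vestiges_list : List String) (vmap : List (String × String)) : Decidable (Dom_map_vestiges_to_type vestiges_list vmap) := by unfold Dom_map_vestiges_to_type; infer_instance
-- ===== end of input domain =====

-- B replaces A's set accumulation + sorted() post-pass by one streaming pass with
-- two flags and a running minimum (objective: simpler).

-- ===== PORT A =====
-- key = (v or "").strip().lower()  (shared by both Pythons, same expression)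
def pvKey (v : String) : String :=
  PySem.Str.lower (PySem.Str.strip (if v == "" then "" else v))

def map_vestiges_to_type (vestiges_list : List String) (vmap : List (String × String)) : String :=
  let codes : PySem.Set String :=
    vestiges_list.foldl (fun codes v =>
      match PySem.Dict.get? ⟨vmap⟩ (pvKey v) with
      | some c => PySem.Set.add codes c
      | none => codes) PySem.Set.empty
  if PySem.Set.contains codes "NECROPOLE" then "NECROPOLE"
  else if PySem.Set.contains codes "ATELIER" then "ATELIER"
  else
    -- 'if codes: return sorted(codes)[0]' : sorted is empty exactly when codes is
    match PySem.List.sorted codes (fun x => x) false with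
    | c :: _ => c
    | [] => "INDETERMINE"

-- ===== PORT B =====
def map_vestiges_to_type_alt (vestiges_list : List String) (vmap : List (String × String)) : String :=
  let st : Bool × Bool × Option String :=
    vestiges_list.foldl (fun st v =>
      match PySem.Dict.get? ⟨vmap⟩ (pvKey v) with
      | none => st
      | some code =>
        if code == "NECROPOLE" then (true, st.2.1, st.2.2)
        else if code == "ATELIER" then (st.1, true, st.2.2)
        else match st.2.2 with
          | none => (st.1, st.2.1, some code)
          | some b => if code < b then (st.1, st.2.1, some code) else st)
      (false, false, none)
  if st.1 then "NECROPOLE"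
  else if st.2.1 then "ATELIER"
  else
    match st.2.2 with
    | some b => b
    | none => "INDETERMINE"

-- ===== PRECONDITION & SPEC =====
def Spec_map_vestiges_to_type (vestiges_list : List String) (vmap : List (String × String)) (out : String) : Prop := out = map_vestiges_to_type_alt vestiges_list vmap
instance (vestiges_list : List String) (vmap : List (String × String)) (out : String) : Decidable (Spec_map_vestiges_to_type vestiges_list vmap out) := by unfold Spec_map_vestiges_to_type; infer_instance

-- ===== CLAIM (what is proved, stated in full; the proofs are below) =====
def Claim_equal_map_vestiges_to_type : Prop := ∀ (vestiges_list : List String) (vmap : List (String × String)), Dom_map_vestiges_to_type vestiges_list vmap → Spec_map_vestiges_to_type vestiges_list vmap (map_vestiges_to_type vestiges_list vmap)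

-- ===== LEMMAS AND PROOFS =====

-- the list of codes actually looked up (duplicates kept, misses dropped)
def pvCodes (vestiges_list : List String) (vmap : List (String × String)) : List String :=
  vestiges_list.filterMap (fun v => PySem.Dict.get? ⟨vmap⟩ (pvKey v))

def pvFinishA (codes : PySem.Set String) : String :=
  if PySem.Set.contains codes "NECROPOLE" then "NECROPOLE"
  else if PySem.Set.contains codes "ATELIER" then "ATELIER"
  else
    match PySem.List.sorted codes (fun x => x) false with
    | c :: _ => c
    | [] => "INDETERMINE"

def pvStep (st : Bool × Bool × Option String) (code : String) : Bool × Bool × Option String :=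
  if code == "NECROPOLE" then (true, st.2.1, st.2.2)
  else if code == "ATELIER" then (st.1, true, st.2.2)
  else match st.2.2 with
    | none => (st.1, st.2.1, some code)
    | some b => if code < b then (st.1, st.2.1, some code) else st

def pvFinishB (st : Bool × Bool × Option String) : String :=
  if st.1 then "NECROPOLE"
  else if st.2.1 then "ATELIER"
  else
    match st.2.2 with
    | some b => b
    | none => "INDETERMINE"

def pvOther (c : String) : Bool := !(c == "NECROPOLE") && !(c == "ATELIER")

def pvInv (s : PySem.Set String) (st : Bool × Bool × Option String) : Prop :=
  st.1 = PySem.Set.contains s "NECROPOLE" ∧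
  st.2.1 = PySem.Set.contains s "ATELIER" ∧
  st.2.2 = PySem.List.min? (s.filter pvOther) (fun x => x)

lemma foldA_eq (vmap : List (String × String)) : ∀ (vl : List String) (s : PySem.Set String),
    vl.foldl (fun codes v =>
      match PySem.Dict.get? ⟨vmap⟩ (pvKey v) with
      | some c => PySem.Set.add codes c
      | none => codes) s = (pvCodes vl vmap).foldl PySem.Set.add s := by
  intro vl
  induction vl with
  | nil => intro s; simp [pvCodes]
  | cons v t ih =>
    intro s
    simp only [List.foldl_cons, pvCodes, List.filterMap_cons]
    cases h : PySem.Dict.get? ⟨vmap⟩ (pvKey v) with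
    | none => simpa [h, pvCodes] using ih _
    | some c => simpa [h, pvCodes] using ih _

lemma foldB_eq (vmap : List (String × String)) : ∀ (vl : List String) (st : Bool × Bool × Option String),
    vl.foldl (fun st v =>
      match PySem.Dict.get? ⟨vmap⟩ (pvKey v) with
      | none => st
      | some code =>
        if code == "NECROPOLE" then (true, st.2.1, st.2.2)
        else if code == "ATELIER" then (st.1, true, st.2.2)
        else match st.2.2 with
          | none => (st.1, st.2.1, some code)
          | some b => if code < b then (st.1, st.2.1, some code) else st) st
      = (pvCodes vl vmap).foldl pvStep st := by
  intro vl
  induction vl with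
  | nil => intro st; simp [pvCodes]
  | cons v t ih =>
    intro st
    simp only [List.foldl_cons, pvCodes, List.filterMap_cons]
    cases h : PySem.Dict.get? ⟨vmap⟩ (pvKey v) with
    | none => simpa [h, pvCodes] using ih _
    | some c => simpa [h, pvCodes, pvStep] using ih _

lemma contains_add (s : PySem.Set String) (x y : String) :
    PySem.Set.contains (PySem.Set.add s x) y = (PySem.Set.contains s y || y == x) := by
  by_cases hy : y = x
  · subst hy
    simp only [beq_self_eq_true, Bool.or_true]
    exact (PySem.Set.contains_iff _ _).mpr ((PySem.Set.mem_add _ _ _).mpr (Or.inr rfl))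
  · simp only [beq_eq_false_iff_ne.mpr hy, Bool.or_false]
    by_cases hm : y ∈ s
    · rw [(PySem.Set.contains_iff _ _).mpr hm,
        (PySem.Set.contains_iff _ _).mpr ((PySem.Set.mem_add _ _ _).mpr (Or.inl hm))]
    · have h1 : PySem.Set.contains s y = false := by
        cases hc : PySem.Set.contains s y
        · rfl
        · exact absurd ((PySem.Set.contains_iff _ _).mp hc) hm
      have h2 : PySem.Set.contains (PySem.Set.add s x) y = false := by
        cases hc : PySem.Set.contains (PySem.Set.add s x) y
        · rfl
        · rcases (PySem.Set.mem_add _ _ _).mp ((PySem.Set.contains_iff _ _).mp hc) with h | h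
          · exact absurd h hm
          · exact absurd h hy
      rw [h1, h2]

lemma min?_append_singleton (l : List String) (c : String) :
    PySem.List.min? (l ++ [c]) (fun x => x)
      = some (match PySem.List.min? l (fun x => x) with | none => c | some m => min m c) := by
  cases l with
  | nil => simp [PySem.List.min?]
  | cons x t =>
    rw [List.cons_append, PySem.List.min?_id_cons, PySem.List.min?_id_cons]
    simp [List.foldl_append]

lemma inv_step (s : PySem.Set String) (st : Bool × Bool × Option String) (c : String)
    (h : pvInv s st) : pvInv (PySem.Set.add s c) (pvStep st c) := by
  obtain ⟨h1, h2, h3⟩ := h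
  by_cases hc1 : c = "NECROPOLE"
  · subst hc1
    refine ⟨?_, ?_, ?_⟩
    · simp [pvStep]
    · simp [pvStep, h2]
    · have hf : (PySem.Set.add s "NECROPOLE").filter pvOther = s.filter pvOther := by
        rw [PySem.Set.add_eq_ite]
        split_ifs with hm
        · rfl
        · simp [List.filter_append, pvOther]
      simp [pvStep, hf, h3]
  · by_cases hc2 : c = "ATELIER"
    · subst hc2
      refine ⟨?_, ?_, ?_⟩
      · simp [pvStep, h1]
      · simp [pvStep]
      · have hf : (PySem.Set.add s "ATELIER").filter pvOther = s.filter pvOther := by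
          rw [PySem.Set.add_eq_ite]
          split_ifs with hm
          · rfl
          · simp [List.filter_append, pvOther]
        simp [pvStep, hf, h3]
    · have hoth : pvOther c = true := by
        simp [pvOther, hc1, hc2]
      have hstep : pvStep st c = (st.1, st.2.1,
          some (match st.2.2 with | none => c | some b => min b c)) := by
        unfold pvStep
        rw [if_neg (by simpa using hc1), if_neg (by simpa using hc2)]
        cases hb : st.2.2 with
        | none => rfl
        | some b =>
          simp only []
          by_cases hlt : c < b
          · rw [if_pos hlt]
            simp [min_eq_right (le_of_lt hlt)]
          · rw [if_neg hlt]
            have : min b c = b := min_eq_left (le_of_not_gt hlt)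
            rw [this]
            cases st with
            | mk a rest => cases rest with
              | mk u w => simp_all
      rw [hstep]
      by_cases hm : c ∈ s
      · have hadd : PySem.Set.add s c = s := PySem.Set.add_of_mem hm
        have hcf : c ∈ s.filter pvOther := List.mem_filter.mpr ⟨hm, hoth⟩
        have hne : s.filter pvOther ≠ [] := List.ne_nil_of_mem hcf
        obtain ⟨m, hmm⟩ : ∃ m, PySem.List.min? (s.filter pvOther) (fun x => x) = some m := by
          cases hq : PySem.List.min? (s.filter pvOther) (fun x => x) with
          | none => exact absurd ((PySem.List.min?_eq_none_iff _ _).mp hq) hne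
          | some m => exact ⟨m, rfl⟩
        have hmc : m ≤ c := PySem.List.min?_isMin hmm c hcf
        refine ⟨by simpa [hadd] using h1, by simpa [hadd] using h2, ?_⟩
        rw [hadd, h3, hmm]
        simp [min_eq_left hmc]
      · have hadd : PySem.Set.add s c = s ++ [c] := PySem.Set.add_of_not_mem hm
        refine ⟨?_, ?_, ?_⟩
        · rw [contains_add, h1]
          simp [show ("NECROPOLE" : String) ≠ c from fun he => hc1 he.symm]
        · rw [contains_add, h2]
          simp [show ("ATELIER" : String) ≠ c from fun he => hc2 he.symm]
        · have hfc : List.filter pvOther (s ++ [c]) = List.filter pvOther s ++ [c] := by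
            simp [List.filter_append, hoth]
          rw [hadd, hfc, min?_append_singleton, h3]

lemma head_sorted_eq_min (s : List String) (c : String) (t : List String) (m : String)
    (hs : PySem.List.sorted s (fun x => x) false = c :: t)
    (hm : PySem.List.min? s (fun x => x) = some m) : c = m := by
  have hcs : c ∈ s := by
    rw [← PySem.List.mem_sorted (key := fun x => x) (rev := false), hs]
    exact List.mem_cons_self
  have hms : m ∈ s := PySem.List.min?_mem hm
  exact le_antisymm (PySem.List.key_head_sorted_le s (fun x => x) hs m hms) (PySem.List.min?_isMin hm c hcs)

lemma inv_finish (s : PySem.Set String) (st : Bool × Bool × Option String)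
    (h : pvInv s st) : pvFinishA s = pvFinishB st := by
  obtain ⟨h1, h2, h3⟩ := h
  unfold pvFinishA pvFinishB
  rw [h1, h2]
  split_ifs with hn ha
  · rfl
  · rfl
  · have hfil : s.filter pvOther = s := by
      apply List.filter_eq_self.mpr
      intro a ha'
      have han : a ≠ "NECROPOLE" := fun he => hn ((PySem.Set.contains_iff _ _).mpr (he ▸ ha'))
      have haa : a ≠ "ATELIER" := fun he => ha ((PySem.Set.contains_iff _ _).mpr (he ▸ ha'))
      simp [pvOther, han, haa]
    rw [hfil] at h3
    cases hs : PySem.List.sorted s (fun x => x) false with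
    | nil =>
      have hnil : s = [] := (PySem.List.sorted_eq_nil_iff _ _ _).mp hs
      rw [h3, hnil]
      simp [PySem.List.min?]
    | cons c t =>
      have hne : s ≠ [] := by
        intro he
        rw [he] at hs
        simp [PySem.List.sorted] at hs
      obtain ⟨m, hmm⟩ : ∃ m, PySem.List.min? s (fun x => x) = some m := by
        cases hq : PySem.List.min? s (fun x => x) with
        | none => exact absurd ((PySem.List.min?_eq_none_iff _ _).mp hq) hne
        | some m => exact ⟨m, rfl⟩
      rw [h3, hmm]
      simpa using head_sorted_eq_min s c t m hs hmm

lemma main_lemma : ∀ (L : List String) (s : PySem.Set String) (st : Bool × Bool × Option String),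
    pvInv s st → pvFinishA (L.foldl PySem.Set.add s) = pvFinishB (L.foldl pvStep st) := by
  intro L
  induction L with
  | nil => intro s st h; exact inv_finish s st h
  | cons c t ih => intro s st h; exact ih _ _ (inv_step s st c h)

-- ===== VERDICT (by name: the statement is the Claim_ definition above) =====
theorem map_vestiges_to_type_spec : Claim_equal_map_vestiges_to_type := by
  intro vl vmap _
  unfold Spec_map_vestiges_to_type map_vestiges_to_type map_vestiges_to_type_alt
  rw [foldA_eq, foldB_eq]
  exact main_lemma (pvCodes vl vmap) PySem.Set.empty (false, false, none)
    (by constructor <;> simp [PySem.Set.empty, PySem.Set.contains, PySem.List.min?])
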